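-- pv_equiv track=rewrite | github.com/ritujadik/DSA-Problem | August_2025/First_Week/05.08.25/fruits_in_basket_II.py | fruits_in_basket
-- ===== SOURCE A (Python) =====
-- def fruits_in_basket(fruits, baskets):
--     n = len(fruits) and len(baskets)
--     count = 0
--     x_new = []
--     used = [False]*n
--
--     for i in range(n):
--         for j in range(n):
--             if not used[j] and baskets[j]>=fruits[i]:
--                 x_new.append(baskets[j])
--                 used[j] = True
--                 break
--         else:
--             count+=1
--     return count
-- ===== SOURCE B (Python) =====
-- def fruits_in_basket(fruits, baskets):
--     # Segment tree of basket capacities: each fruit takes the leftmost basket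
--     # whose capacity >= fruit (query+mark in O(log n) instead of a linear scan).
--     n = len(baskets) if fruits else 0
--     if n == 0:
--         return 0
--     NEG = -(2**31) - 1  # below every admissible fruit value
--
--     def build(xs):
--         if len(xs) == 1:
--             return ('L', xs[0])
--         k = len(xs) // 2
--         l = build(xs[:k])
--         r = build(xs[k:])
--         return ('N', max(l[1], r[1]), l, r)
--
--     def qu(t, f):
--         # take the leftmost leaf >= f, mark it used; None if no such leaf
--         if t[0] == 'L':
--             return ('L', NEG) if t[1] >= f else None
--         _, m, l, r = t
--         if m < f:
--             return None
--         nl = qu(l, f)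
--         if nl is not None:
--             return ('N', max(nl[1], r[1]), nl, r)
--         nr = qu(r, f)
--         if nr is not None:
--             return ('N', max(l[1], nr[1]), l, nr)
--         return None
--
--     t = build(baskets)
--     count = 0
--     for f in fruits[:n]:
--         res = qu(t, f)
--         if res is None:
--             count += 1
--         else:
--             t = res
--     return count
-- ===== Notes on version B (the rewrite author's own statement) =====
-- stated objective: faster
-- what changed: Replaces the O(n^2) inner linear scan over used-flags by a segment tree of maximum capacities queried for the leftmost basket >= fruit (query marks the basket used), giving O(n log n).
import Mathlib
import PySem

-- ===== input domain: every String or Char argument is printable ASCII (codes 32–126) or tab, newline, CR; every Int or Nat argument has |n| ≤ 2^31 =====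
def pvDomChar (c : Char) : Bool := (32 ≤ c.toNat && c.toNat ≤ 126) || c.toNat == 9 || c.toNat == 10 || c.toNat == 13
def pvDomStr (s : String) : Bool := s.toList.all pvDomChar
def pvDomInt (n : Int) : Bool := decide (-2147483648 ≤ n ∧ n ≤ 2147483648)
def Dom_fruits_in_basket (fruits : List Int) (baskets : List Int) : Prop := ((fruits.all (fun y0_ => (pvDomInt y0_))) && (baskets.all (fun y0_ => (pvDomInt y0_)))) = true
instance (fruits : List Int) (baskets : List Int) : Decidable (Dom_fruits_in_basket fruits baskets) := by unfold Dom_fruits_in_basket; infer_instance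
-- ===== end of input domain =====

-- B replaces A's quadratic first-fit inner scan by a segment tree of maximum capacities
-- (leftmost basket ≥ fruit query that marks the basket used); measured faster.

-- ===== PORT A =====
-- inner 'for j in range(n): … break / else' loop of A; some (used', x_new') on break, none on fall-through
def innerA (b : List Int) (f : Int) : List Int → List Bool → List Int → Option (List Bool × List Int)
  | [], _, _ => none
  | j :: js, u, x =>
    if PySem.List.pyGetD u j true = false ∧ PySem.List.pyGetD b j 0 ≥ f then
      some (u.set j.toNat true, x ++ [PySem.List.pyGetD b j 0])
    else innerA b f js u x

def fruits_in_basket (fruits : List Int) (baskets : List Int) : Int :=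
  -- n = len(fruits) and len(baskets)
  let n : Int := if fruits.length = 0 then 0 else (baskets.length : Int)
  -- state (count, used, x_new); fruits[i] read via pyGetD (exact inside Pre_, where i is in range)
  let st := (PySem.List.pyRange 0 n 1).foldl
    (fun (st : Int × List Bool × List Int) i =>
      match innerA baskets (PySem.List.pyGetD fruits i 0) (PySem.List.pyRange 0 n 1) st.2.1 st.2.2 with
      | some (u', x') => (st.1, u', x')
      | none => (st.1 + 1, st.2.1, st.2.2))
    ((0 : Int), List.replicate n.toNat false, ([] : List Int))
  st.1

-- ===== PORT B =====
inductive SegT where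
  | leaf : Int → SegT
  | node : Int → SegT → SegT → SegT
deriving DecidableEq, Repr

def SegT.mx : SegT → Int
  | .leaf v => v
  | .node m _ _ => m

def NEGB : Int := -(2 ^ 31) - 1

-- build(xs): xs[:k]/xs[k:] with 0 ≤ k ≤ len(xs) are exactly take/drop
def build : List Int → SegT
  | [] => .leaf NEGB   -- unreachable: build is only called on nonempty lists
  | [x] => .leaf x
  | x :: y :: rest =>
    let k := (x :: y :: rest).length / 2
    let l := build ((x :: y :: rest).take k)
    let r := build ((x :: y :: rest).drop k)
    .node (max l.mx r.mx) l r
termination_by xs => xs.length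
decreasing_by
  · simp; omega
  · simp; omega

-- qu(t, f): leftmost leaf ≥ f marked used, or None
def qu : SegT → Int → Option SegT
  | .leaf v, f => if v ≥ f then some (.leaf NEGB) else none
  | .node m l r, f =>
    if m < f then none
    else
      match qu l f with
      | some nl => some (.node (max nl.mx r.mx) nl r)
      | none =>
        match qu r f with
        | some nr => some (.node (max l.mx nr.mx) l nr)
        | none => none

def fruits_in_basket_alt (fruits : List Int) (baskets : List Int) : Int :=
  let n : Int := if fruits = [] then 0 else (baskets.length : Int)
  if n = 0 then 0
  else
    let st := (PySem.List.slice fruits none (some n)).foldl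
      (fun (st : Int × SegT) f =>
        match qu st.2 f with
        | none => (st.1 + 1, st.2)
        | some t' => (st.1, t'))
      ((0 : Int), build baskets)
    st.1

-- ===== PRECONDITION & SPEC =====
-- A raises IndexError (fruits[i] with i ≥ len(fruits)) whenever fruits is nonempty and
-- len(baskets) > len(fruits); exactly those inputs are excluded.
def Pre_fruits_in_basket (fruits : List Int) (baskets : List Int) : Prop :=
  fruits = [] ∨ baskets.length ≤ fruits.length
instance (fruits : List Int) (baskets : List Int) : Decidable (Pre_fruits_in_basket fruits baskets) := by
  unfold Pre_fruits_in_basket; infer_instance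

def pvWitness_fruits_in_basket : List Int × List Int := ([3, 1, 4], [2, 5])

def Spec_fruits_in_basket (fruits : List Int) (baskets : List Int) (out : Int) : Prop := out = fruits_in_basket_alt fruits baskets
instance (fruits : List Int) (baskets : List Int) (out : Int) : Decidable (Spec_fruits_in_basket fruits baskets out) := by unfold Spec_fruits_in_basket; infer_instance

-- ===== CLAIM (what is proved, stated in full; the proofs are below) =====
def Claim_equal_fruits_in_basket : Prop := ∀ (fruits : List Int) (baskets : List Int), Dom_fruits_in_basket fruits baskets → Pre_fruits_in_basket fruits baskets → Spec_fruits_in_basket fruits baskets (fruits_in_basket fruits baskets)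

-- ===== LEMMAS AND PROOFS =====

-- middle spec: structural first-fit on a list of remaining capacities
def ffL (f : Int) : List Int → Option (List Int)
  | [] => none
  | v :: vs => if v ≥ f then some (NEGB :: vs) else (ffL f vs).map (v :: ·)

def wfST : SegT → Prop
  | .leaf _ => True
  | .node m l r => m = max l.mx r.mx ∧ wfST l ∧ wfST r

def vals : SegT → List Int
  | .leaf v => [v]
  | .node _ l r => vals l ++ vals r

-- capacities still available given used-flags
def uvals (u : List Bool) (b : List Int) : List Int :=
  List.zipWith (fun x v => if x then NEGB else v) u b

theorem mx_lt_iff (t : SegT) (f : Int) (h : wfST t) :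
    t.mx < f ↔ ∀ v ∈ vals t, v < f := by
  induction t with
  | leaf v => simp [SegT.mx, vals]
  | node m l r ihl ihr =>
    obtain ⟨hm, hl, hr⟩ := h
    rw [show (SegT.node m l r).mx = m from rfl, hm, max_lt_iff, ihl hl, ihr hr]
    simp [vals, or_imp, forall_and]

theorem ffL_append (f : Int) (xs ys : List Int) :
    ffL f (xs ++ ys) =
      match ffL f xs with
      | some xs' => some (xs' ++ ys)
      | none => (ffL f ys).map (xs ++ ·) := by
  induction xs with
  | nil => simp [ffL]
  | cons v vs ih =>
    by_cases hv : v ≥ f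
    · simp [ffL, hv]
    · simp only [List.cons_append, ffL, if_neg hv, ih]
      cases ffL f vs with
      | some xs' => simp
      | none => cases ffL f ys <;> simp

theorem ffL_none_iff (f : Int) (xs : List Int) :
    ffL f xs = none ↔ ∀ v ∈ xs, v < f := by
  induction xs with
  | nil => simp [ffL]
  | cons v vs ih =>
    by_cases hv : v ≥ f
    · simp [ffL, hv]
    · simp only [ffL, if_neg hv, Option.map_eq_none_iff, ih, List.forall_mem_cons]
      constructor
      · exact fun h => ⟨by omega, h⟩
      · exact fun h => h.2

theorem qu_spec (t : SegT) (f : Int) (h : wfST t) :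
    (qu t f).map vals = ffL f (vals t) ∧ ∀ t', qu t f = some t' → wfST t' := by
  induction t with
  | leaf v =>
    by_cases hv : v ≥ f
    · refine ⟨by simp [qu, vals, ffL, hv], ?_⟩
      intro t' ht'
      simp [qu, hv] at ht'
      subst ht'
      trivial
    · simp [qu, vals, ffL, hv, wfST]
  | node m l r ihl ihr =>
    obtain ⟨hm, hl, hr⟩ := h
    obtain ⟨ihl1, ihl2⟩ := ihl hl
    obtain ⟨ihr1, ihr2⟩ := ihr hr
    by_cases hlt : m < f
    · constructor
      · have hnone : ffL f (vals l ++ vals r) = none := by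
          rw [ffL_none_iff]
          intro v hv
          rcases List.mem_append.mp hv with h' | h'
          · exact (mx_lt_iff l f hl).mp (by rw [hm] at hlt; omega) v h'
          · exact (mx_lt_iff r f hr).mp (by rw [hm] at hlt; omega) v h'
        simp [qu, hlt, vals, hnone]
      · intro t' ht'; simp [qu, hlt] at ht'
    · cases hql : qu l f with
      | some nl =>
        have hvl : ffL f (vals l) = some (vals nl) := by rw [← ihl1, hql]; rfl
        constructor
        · simp [qu, hlt, hql, vals, ffL_append, hvl]
        · intro t' ht'
          simp [qu, hlt, hql] at ht'
          subst ht'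
          exact ⟨rfl, ihl2 nl hql, hr⟩
      | none =>
        have hvl : ffL f (vals l) = none := by rw [← ihl1, hql]; rfl
        cases hqr : qu r f with
        | some nr =>
          have hvr : ffL f (vals r) = some (vals nr) := by rw [← ihr1, hqr]; rfl
          constructor
          · simp [qu, hlt, hql, hqr, vals, ffL_append, hvl, hvr]
          · intro t' ht'
            simp [qu, hlt, hql, hqr] at ht'
            subst ht'
            exact ⟨rfl, hl, ihr2 nr hqr⟩
        | none =>
          have hvr : ffL f (vals r) = none := by rw [← ihr1, hqr]; rfl
          constructor
          · simp [qu, hlt, hql, hqr, vals, ffL_append, hvl, hvr]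
          · intro t' ht'; simp [qu, hlt, hql, hqr] at ht'

theorem build_spec : ∀ (n : Nat) (xs : List Int), xs.length ≤ n → xs ≠ [] →
    vals (build xs) = xs ∧ wfST (build xs) := by
  intro n
  induction n with
  | zero => intro xs h h'; cases xs <;> simp_all
  | succ n ih =>
    intro xs hlen hne
    match xs with
    | [x] => simp [build, vals, wfST]
    | x :: y :: rest =>
      rw [build]
      have hL : (x :: y :: rest).length = rest.length + 2 := by simp
      set k := (x :: y :: rest).length / 2 with hk
      have hk1 : 1 ≤ k := by omega
      have hk2 : k < (x :: y :: rest).length := by omega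
      have htake := ih ((x :: y :: rest).take k)
        (by simp [List.length_take]; omega)
        (by intro h; have := congrArg List.length h; simp [List.length_take] at this; omega)
      have hdrop := ih ((x :: y :: rest).drop k)
        (by simp [List.length_drop]; omega)
        (by intro h; have := congrArg List.length h; simp [List.length_drop] at this; omega)
      refine ⟨?_, ?_, htake.2, hdrop.2⟩
      · simp [vals, htake.1, hdrop.1]
      · rfl

theorem uvals_length (u : List Bool) (b : List Int) (h : u.length = b.length) :
    (uvals u b).length = b.length := by simp [uvals, h]

theorem uvals_set (u : List Bool) (b : List Int) (k : Nat)
    (h : u.length = b.length) (hk : k < b.length) :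
    uvals (u.set k true) b = (uvals u b).set k NEGB := by
  apply List.ext_getElem
  · simp [uvals, h]
  · intro i h1 h2
    simp only [uvals, List.getElem_zipWith, List.getElem_set]
    by_cases hik : i = k
    · simp [hik]
    · simp [hik, Ne.symm hik]

theorem uvals_replicate_false (b : List Int) :
    uvals (List.replicate b.length false) b = b := by
  induction b with
  | nil => rfl
  | cons v vs ih => simpa [uvals, List.replicate_succ] using ih

-- the inner index loop of A computes exactly structural first-fit on the remaining capacities
theorem inner_spec (b : List Int) (f : Int) (hf : NEGB < f) :
    ∀ (d j : Nat), j + d = b.length → ∀ (u : List Bool) (x : List Int), u.length = b.length →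
    match innerA b f (PySem.List.pyRange (j : Int) (b.length : Int) 1) u x with
    | none => ffL f ((uvals u b).drop j) = none
    | some (u', _) => ∃ k : Nat, j ≤ k ∧ k < b.length ∧ u' = u.set k true ∧
        ffL f ((uvals u b).drop j) = some (((uvals u b).set k NEGB).drop j) := by
  intro d
  induction d with
  | zero =>
    intro j hj u x hu
    have hrange : PySem.List.pyRange (j : Int) (b.length : Int) 1 = [] := by
      rw [PySem.List.pyRange_one]
      have : ((b.length : Int) - (j : Int)).toNat = 0 := by omega
      simp [this]
    rw [hrange]
    have hdrop : ((uvals u b).drop j) = [] := by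
      apply List.drop_eq_nil_of_le
      rw [uvals_length u b hu]; omega
    simp [innerA, hdrop, ffL]
  | succ d ih =>
    intro j hj u x hu
    have hjlt : j < b.length := by omega
    have hju : j < u.length := by omega
    have hcons : PySem.List.pyRange (j : Int) (b.length : Int) 1
        = (j : Int) :: PySem.List.pyRange ((j : Int) + 1) (b.length : Int) 1 :=
      PySem.List.pyRange_one_cons (by exact_mod_cast hjlt)
    have hulen : (uvals u b).length = b.length := uvals_length u b hu
    have hdropj : (uvals u b).drop j = (uvals u b)[j]'(by omega) :: (uvals u b).drop (j + 1) :=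
      List.drop_eq_getElem_cons (by omega)
    have hgu : PySem.List.pyGetD u (j : Int) true = u[j] := by
      rw [PySem.List.pyGetD_natCast]; exact List.getD_eq_getElem u true hju
    have hgb : PySem.List.pyGetD b (j : Int) 0 = b[j] := by
      rw [PySem.List.pyGetD_natCast]; exact List.getD_eq_getElem b 0 hjlt
    have hval : (uvals u b)[j]'(by omega) = if u[j] then NEGB else b[j] := by
      simp [uvals]
    rw [hcons]
    by_cases hc : u[j] = false ∧ b[j] ≥ f
    · -- break at index j
      have hbr : innerA b f ((j : Int) :: PySem.List.pyRange ((j : Int) + 1) (b.length : Int) 1) u x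
          = some (u.set (j : Int).toNat true, x ++ [PySem.List.pyGetD b (j : Int) 0]) := by
        simp [innerA, hgu, hgb, hc.1, hc.2]
      rw [hbr]
      refine ⟨j, le_refl j, hjlt, by simp, ?_⟩
      have hset : ((uvals u b).set j NEGB).drop j
          = NEGB :: (uvals u b).drop (j + 1) := by
        rw [List.drop_eq_getElem_cons (by simp; omega)]
        simp [List.getElem_set, List.drop_set]
      rw [hdropj, hset, ffL]
      simp [hval, hc.1, hc.2]
    · -- no break at j: head value < f, recurse
      have hlt : (uvals u b)[j]'(by omega) < f := by
        rw [hval]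
        by_cases hu' : u[j]
        · simpa [hu'] using hf
        · simp only [hu', if_false]
          simp [hu'] at hc
          omega
      have hstep : innerA b f ((j : Int) :: PySem.List.pyRange ((j : Int) + 1) (b.length : Int) 1) u x
          = innerA b f (PySem.List.pyRange ((j : Int) + 1) (b.length : Int) 1) u x := by
        simp only [innerA, hgu, hgb]
        rw [if_neg]
        intro h
        exact hc ⟨h.1, h.2⟩
      rw [hstep]
      have hcast : ((j : Int) + 1) = ((j + 1 : Nat) : Int) := by push_cast; ring
      rw [hcast]
      have hih := ih (j + 1) (by omega) u x hu
      rw [hdropj]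
      cases hres : innerA b f (PySem.List.pyRange ((j + 1 : Nat) : Int) (b.length : Int) 1) u x with
      | none =>
        rw [hres] at hih
        simp only [ffL, if_neg (by omega : ¬ (uvals u b)[j]'(by omega) ≥ f), hih]
        rfl
      | some p =>
        rw [hres] at hih
        obtain ⟨k, hk1, hk2, hk3, hk4⟩ := hih
        refine ⟨k, by omega, hk2, hk3, ?_⟩
        simp only [ffL, if_neg (by omega : ¬ (uvals u b)[j]'(by omega) ≥ f), hk4]
        have hsetdrop : ((uvals u b).set k NEGB).drop j
            = ((uvals u b).set k NEGB)[j]'(by simp; omega) :: ((uvals u b).set k NEGB).drop (j + 1) :=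
          List.drop_eq_getElem_cons (by simp; omega)
        have hjk : ((uvals u b).set k NEGB)[j]'(by simp; omega) = (uvals u b)[j]'(by omega) := by
          rw [List.getElem_set]
          rw [if_neg (by omega)]
        rw [hsetdrop, hjk]
        rfl

-- the two folds over the fruit prefix agree, given the tree mirrors the used-flags
theorem outer_spec (b : List Int) :
    ∀ (fs : List Int) (c : Int) (u : List Bool) (x : List Int) (t : SegT),
    u.length = b.length → wfST t → vals t = uvals u b → (∀ f ∈ fs, NEGB < f) →
    (fs.foldl (fun (st : Int × List Bool × List Int) f =>
        match innerA b f (PySem.List.pyRange 0 (b.length : Int) 1) st.2.1 st.2.2 with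
        | some (u', x') => (st.1, u', x')
        | none => (st.1 + 1, st.2.1, st.2.2)) (c, u, x)).1
    = (fs.foldl (fun (st : Int × SegT) f =>
        match qu st.2 f with
        | none => (st.1 + 1, st.2)
        | some t' => (st.1, t')) (c, t)).1 := by
  intro fs
  induction fs with
  | nil => intro c u x t _ _ _ _; rfl
  | cons f fs ih =>
    intro c u x t hu hwf hvt hall
    have hf : NEGB < f := hall f (List.mem_cons_self ..)
    have hrest : ∀ g ∈ fs, NEGB < g := fun g hg => hall g (List.mem_cons_of_mem _ hg)
    have hinner := inner_spec b f hf b.length 0 (by omega) u x hu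
    simp only [Nat.cast_zero] at hinner
    obtain ⟨hq1, hq2⟩ := qu_spec t f hwf
    simp only [List.foldl_cons]
    cases hres : innerA b f (PySem.List.pyRange 0 (b.length : Int) 1) u x with
    | none =>
      rw [hres] at hinner
      simp only [List.drop_zero] at hinner
      have hqu : qu t f = none := by
        cases hq : qu t f with
        | none => rfl
        | some t' => rw [hq, hvt, hinner] at hq1; simp at hq1
      rw [hqu]
      exact ih (c + 1) u x t hu hwf hvt hrest
    | some p =>
      obtain ⟨u', x'⟩ := p
      rw [hres] at hinner
      simp only [List.drop_zero] at hinner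
      obtain ⟨k, _, hk2, hk3, hk4⟩ := hinner
      cases hq : qu t f with
      | none => rw [hq, hvt, hk4] at hq1; simp at hq1
      | some t' =>
        have hvt' : vals t' = (uvals u b).set k NEGB := by
          rw [hq, hvt, hk4] at hq1
          simpa using hq1
        show (List.foldl _ (c, u', x') fs).1 = (List.foldl _ ((c : Int), t') fs).1
        refine ih c u' x' t' (by rw [hk3]; simp [hu]) (hq2 t' hq) ?_ hrest
        rw [hvt', hk3, uvals_set u b k hu hk2]

-- ===== VERDICT (by name: the statement is the Claim_ definition above) =====
theorem fruits_in_basket_spec : Claim_equal_fruits_in_basket := by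
  intro fruits baskets hDom hPre
  unfold Spec_fruits_in_basket
  by_cases hf : fruits = []
  · subst hf
    simp [fruits_in_basket, fruits_in_basket_alt]
  · have hflen : fruits.length ≠ 0 := by simpa [List.length_eq_zero_iff] using hf
    have hble : baskets.length ≤ fruits.length := by
      rcases hPre with h | h
      · exact absurd h hf
      · exact h
    by_cases hb : baskets = []
    · subst hb
      simp [fruits_in_basket, fruits_in_basket_alt, hf, hflen]
    · have hblen : baskets.length ≠ 0 := by simpa [List.length_eq_zero_iff] using hb
      set L := baskets.length with hL
      have hslice : PySem.List.slice fruits none (some (L : Int)) = fruits.take L :=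
        PySem.List.slice_to_natCast fruits L
      have hBuild := build_spec L baskets (le_refl _) hb
      have hfoldA :
          (PySem.List.pyRange 0 (L : Int) 1).foldl
            (fun (st : Int × List Bool × List Int) i =>
              match innerA baskets (PySem.List.pyGetD fruits i 0) (PySem.List.pyRange 0 (L : Int) 1) st.2.1 st.2.2 with
              | some (u', x') => (st.1, u', x')
              | none => (st.1 + 1, st.2.1, st.2.2))
            ((0 : Int), List.replicate L false, ([] : List Int))
          = (fruits.take L).foldl
            (fun (st : Int × List Bool × List Int) f =>
              match innerA baskets f (PySem.List.pyRange 0 (L : Int) 1) st.2.1 st.2.2 with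
              | some (u', x') => (st.1, u', x')
              | none => (st.1 + 1, st.2.1, st.2.2))
            ((0 : Int), List.replicate L false, ([] : List Int)) := by
        have hlen : PySem.List.len (fruits.take L) = (L : Int) := by
          simp [PySem.List.len_eq, List.length_take]; omega
        have hcore := PySem.List.foldl_pyRange_zero_pyGetD (fruits.take L) (0 : Int)
          (fun (st : Int × List Bool × List Int) f =>
            match innerA baskets f (PySem.List.pyRange 0 (L : Int) 1) st.2.1 st.2.2 with
            | some (u', x') => (st.1, u', x')
            | none => (st.1 + 1, st.2.1, st.2.2))
          ((0 : Int), List.replicate L false, ([] : List Int))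
        rw [hlen] at hcore
        rw [← hcore]
        apply PySem.List.foldl_congr_mem
        intro st i hi
        have hmem := (PySem.List.mem_pyRange_one).mp hi
        have hgd : PySem.List.pyGetD fruits i 0 = PySem.List.pyGetD (fruits.take L) i 0 := by
          rw [PySem.List.pyGetD_eq_getElem fruits 0 hmem.1 (by omega),
              PySem.List.pyGetD_eq_getElem (fruits.take L) 0 hmem.1
                (by simp [List.length_take]; omega)]
          simp
        rw [hgd]
      have hmain := outer_spec baskets (fruits.take L) 0 (List.replicate L false) [] (build baskets)
        (by simp [hL]) hBuild.2
        (by rw [hBuild.1]; exact (uvals_replicate_false baskets).symm)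
        (by
          intro g hg
          have hg' : g ∈ fruits := List.mem_of_mem_take hg
          have hd : pvDomInt g = true := by
            unfold Dom_fruits_in_basket at hDom
            simp only [Bool.and_eq_true, List.all_eq_true] at hDom
            exact hDom.1 g hg'
          simp only [pvDomInt, decide_eq_true_eq] at hd
          unfold NEGB
          omega)
      show fruits_in_basket fruits baskets = fruits_in_basket_alt fruits baskets
      unfold fruits_in_basket fruits_in_basket_alt
      simp only [hflen, if_false, if_neg hf, ← hL]
      rw [if_neg (by exact_mod_cast hblen)]
      rw [hslice]
      simpa [Int.toNat_natCast] using hfoldA ▸ hmain
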